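-- pv_equiv track=rewrite | github.com/backsty/Professional-Python | 5.Regexp/hw.py | merges_personal_datas
-- ===== SOURCE A (Python) =====
-- from collections import defaultdict
--
-- def merges_personal_datas(contacts):
--     """
--     Combines a list of dictionaries of personal data, comparing by last name and first name.
--
--     :param contacts: A list of personal data dictionaries.
--     :return: A list of combined dictionaries of personal data.
--     """
--     merged_data = defaultdict(dict)
--
--     for contact in contacts:
--         key = (contact.get('lastname', ''), contact.get('firstname', ''))
--         if not merged_data[key]:
--             merged_data[key] = contact
--         else:
--             for k, v in contact.items():
--                 if not merged_data[key][k] and v: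
--                     merged_data[key][k] = v
--
--     return list(merged_data.values())
-- ===== SOURCE B (Python) =====
-- def merges_personal_datas(contacts):
--     """
--     Combines a list of dictionaries of personal data, comparing by last name and first name.
--
--     Two-pass re-implementation: first group the contacts by (lastname, firstname)
--     preserving first-occurrence order, then fold each group, rebuilding the
--     accumulator with a dict comprehension (empty fields take the newcomer's value).
--     Unlike A it does not mutate the input dictionaries.
--     """
--     groups = {}
--     for contact in contacts:
--         key = (contact.get('lastname', ''), contact.get('firstname', ''))
--         groups.setdefault(key, []).append(contact)
--
--     result = []
--     for group in groups.values():
--         acc = {}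
--         for contact in group:
--             if not acc:
--                 acc = contact
--             else:
--                 acc = {k: (v if v else contact.get(k, '')) for k, v in acc.items()}
--         result.append(acc)
--     return result
-- ===== Notes on version B (the rewrite author's own statement) =====
-- stated objective: alternative
-- what changed: B is a two-pass decomposition: it first groups the contacts by (lastname, firstname) in first-occurrence order, then folds each group, rebuilding the accumulator with a dict comprehension over the accumulator's own fields instead of A's single defaultdict pass with an in-place conditional write loop over each new contact's items; B also does not mutate the input dicts (A does).
import Mathlib
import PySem

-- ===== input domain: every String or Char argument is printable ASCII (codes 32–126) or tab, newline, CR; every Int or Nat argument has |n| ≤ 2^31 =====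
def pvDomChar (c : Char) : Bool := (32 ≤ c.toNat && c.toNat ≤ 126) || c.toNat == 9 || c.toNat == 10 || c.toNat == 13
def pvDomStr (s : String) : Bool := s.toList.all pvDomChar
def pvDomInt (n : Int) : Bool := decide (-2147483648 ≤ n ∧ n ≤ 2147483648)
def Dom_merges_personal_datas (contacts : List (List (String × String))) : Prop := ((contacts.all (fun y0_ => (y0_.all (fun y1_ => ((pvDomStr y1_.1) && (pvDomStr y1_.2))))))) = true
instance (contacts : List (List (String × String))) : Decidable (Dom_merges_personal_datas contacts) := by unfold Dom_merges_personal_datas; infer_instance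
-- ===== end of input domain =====

-- B regroups the contacts by key first and rebuilds each accumulator functionally (a different decomposition,
-- same cost); note A mutates the input dicts in place while B does not — the claim is about the return value only.

-- key = (contact.get('lastname', ''), contact.get('firstname', '')) — computed by both Pythons
def pvKey (c : PySem.Dict String String) : String × String :=
  (c.getD "lastname" "", c.getD "firstname" "")

-- ===== PORT A =====
-- for k, v in contact.items(): if not merged_data[key][k] and v: merged_data[key][k] = v
def pvMergeA (acc : PySem.Dict String String) (c : PySem.Dict String String) :
    PySem.Dict String String :=
  c.items.foldl (fun acc kv =>
    match acc.get? kv.1 with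
    | none => acc                 -- Python raises KeyError here; such inputs are excluded by Pre_
    | some cur => if cur = "" ∧ kv.2 ≠ "" then acc.insert kv.1 kv.2 else acc) acc

def merges_personal_datas (contacts : List (List (String × String))) :
    List (List (String × String)) :=
  let md := contacts.foldl (fun md c0 =>
      let c := PySem.Dict.ofList c0       -- the contact as a Python dict
      let key := pvKey c
      let cur := md.getD key PySem.Dict.empty   -- defaultdict access (insert of {} then overwrite = plain insert below)
      if cur.items = [] then md.insert key c
      else md.insert key (pvMergeA cur c))      -- in-place mutation of md[key] = overwrite at the same position
    PySem.Dict.empty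
  md.values.map (fun d => d.items)

-- ===== PORT B =====
-- acc = {k: (v if v else contact.get(k, '')) for k, v in acc.items()} — exact as a map since acc's keys are distinct
def pvMergeB (acc : PySem.Dict String String) (c : PySem.Dict String String) :
    PySem.Dict String String :=
  if acc.items = [] then c
  else PySem.Dict.mk (acc.items.map (fun kv => (kv.1, if kv.2 = "" then c.getD kv.1 "" else kv.2)))

def merges_personal_datas_alt (contacts : List (List (String × String))) :
    List (List (String × String)) :=
  let cs := contacts.map PySem.Dict.ofList
  -- groups.setdefault(key, []).append(contact)  ==  groups[key] = groups.get(key, []) + [contact]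
  let groups := cs.foldl (fun g c => g.modify (pvKey c) [] (fun grp => grp ++ [c])) PySem.Dict.empty
  groups.values.map (fun grp => (grp.foldl pvMergeB PySem.Dict.empty).items)

-- ===== PRECONDITION & SPEC =====
-- the nonempty contacts of the (lastname, firstname)-group of key k, in input order
def pvGroupNE (contacts : List (List (String × String))) (k : String × String) :
    List (PySem.Dict String String) :=
  ((contacts.map PySem.Dict.ofList).filter (fun c => decide (pvKey c = k))).filter
    (fun c => !c.items.isEmpty)

-- Pre_ excludes exactly the inputs on which A raises KeyError: some nonempty contact carries a field
-- that the first nonempty contact of its (lastname, firstname)-group does not have.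
def Pre_merges_personal_datas (contacts : List (List (String × String))) : Prop :=
  ∀ c ∈ contacts.map PySem.Dict.ofList,
    ∀ d ∈ (pvGroupNE contacts (pvKey c)).tail,
      ∀ x ∈ PySem.Dict.keys d,
        x ∈ PySem.Dict.keys ((pvGroupNE contacts (pvKey c)).headD PySem.Dict.empty)
instance (contacts : List (List (String × String))) : Decidable (Pre_merges_personal_datas contacts) := by
  unfold Pre_merges_personal_datas; infer_instance

def pvWitness_merges_personal_datas : (List (List (String × String))) :=
  [[("lastname", "smith"), ("phone", "")], [("lastname", "smith"), ("phone", "5551")]]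

def Spec_merges_personal_datas (contacts : List (List (String × String))) (out : List (List (String × String))) : Prop := out = merges_personal_datas_alt contacts
instance (contacts : List (List (String × String))) (out : List (List (String × String))) : Decidable (Spec_merges_personal_datas contacts out) := by unfold Spec_merges_personal_datas; infer_instance

-- ===== CLAIM (what is proved, stated in full; the proofs are below) =====
def Claim_equal_merges_personal_datas : Prop := ∀ (contacts : List (List (String × String))), Dom_merges_personal_datas contacts → Pre_merges_personal_datas contacts → Spec_merges_personal_datas contacts (merges_personal_datas contacts)

-- ===== LEMMAS AND PROOFS =====

-- a dict with no items is the empty dict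
theorem pvDict_eq_empty {κ ν : Type} (d : PySem.Dict κ ν) (h : d.items = []) : d = PySem.Dict.empty := by
  apply PySem.Dict.ext; simpa using h

-- A's group step: replace when empty, merge otherwise
def pvStepA (acc : PySem.Dict String String) (c : PySem.Dict String String) :
    PySem.Dict String String :=
  if acc.items = [] then c else pvMergeA acc c

theorem pvStepA_empty_c (acc c : PySem.Dict String String) (h : c.items = []) :
    pvStepA acc c = acc := by
  by_cases h2 : acc.items = []
  · rw [pvDict_eq_empty c h, pvDict_eq_empty acc h2]
    simp [pvStepA, PySem.Dict.empty]
  · simp [pvStepA, h2, pvMergeA, h]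

theorem pvMergeB_empty_c (acc c : PySem.Dict String String) (h : c.items = []) :
    pvMergeB acc c = acc := by
  by_cases h2 : acc.items = []
  · rw [pvDict_eq_empty c h, pvDict_eq_empty acc h2]
    simp [pvMergeB, PySem.Dict.empty]
  · rw [pvDict_eq_empty c h]
    simp only [pvMergeB, h2, PySem.Dict.getD_empty]
    have : acc.items.map (fun kv => (kv.1, if kv.2 = "" then "" else kv.2)) = acc.items.map id := by
      apply List.map_congr_left; intro p _
      cases p with
      | mk a b => by_cases hp : b = "" <;> simp [hp]
    rw [this, List.map_id]; apply PySem.Dict.ext; simp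

theorem pvMergeB_keys (acc c : PySem.Dict String String) (h : acc.items ≠ []) :
    (pvMergeB acc c).keys = acc.keys := by
  simp only [pvMergeB, h]
  simp [PySem.Dict.keys]

-- skip elements the step ignores
theorem pvFoldl_skip {α β : Type} (p : β → Bool) (step : α → β → α)
    (h : ∀ acc c, p c = false → step acc c = acc) :
    ∀ (l : List β) (acc : α), l.foldl step acc = (l.filter p).foldl step acc := by
  intro l
  induction l with
  | nil => intro acc; rfl
  | cons c t ih =>
    intro acc
    cases hp : p c with
    | true => simp only [List.foldl_cons, List.filter_cons, hp, if_true]; exact ih _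
    | false => simp only [List.foldl_cons, List.filter_cons, hp]; rw [h acc c hp]; exact ih _

-- the inner loop of A characterised: given all of l's keys live in acc, it rewrites acc pointwise
theorem pvMergeA_inner_spec (l : List (String × String)) :
    ∀ (acc : PySem.Dict String String), acc.keys.Nodup → (l.map Prod.fst).Nodup →
    (∀ p ∈ l, p.1 ∈ acc.keys) →
    l.foldl (fun acc kv =>
      match acc.get? kv.1 with
      | none => acc
      | some cur => if cur = "" ∧ kv.2 ≠ "" then acc.insert kv.1 kv.2 else acc) acc
    = PySem.Dict.mk (acc.items.map (fun kv =>
        (kv.1, if kv.2 = "" then (PySem.Dict.mk l).getD kv.1 "" else kv.2))) := by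
  induction l with
  | nil =>
    intro acc _ _ _
    simp only [List.foldl_nil]
    have : acc.items.map (fun kv =>
        (kv.1, if kv.2 = "" then (PySem.Dict.mk ([] : List (String × String))).getD kv.1 "" else kv.2))
        = acc.items.map id := by
      apply List.map_congr_left; intro p _
      cases p with
      | mk a b =>
        by_cases hb : b = "" <;>
          simp [hb, PySem.Dict.getD_eq_get?_getD, PySem.Dict.get?]
    rw [this, List.map_id]
  | cons kv t ih =>
    obtain ⟨k, v⟩ := kv
    intro acc hacc hnd hsub
    have hkmem : k ∈ acc.keys := hsub (k, v) (List.mem_cons_self)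
    have hknott : k ∉ t.map Prod.fst := (List.nodup_cons.mp hnd).1
    have hndt : (t.map Prod.fst).Nodup := (List.nodup_cons.mp hnd).2
    obtain ⟨cur, hget⟩ : ∃ cur, acc.get? k = some cur := by
      cases hg : acc.get? k with
      | none => exact absurd hkmem ((PySem.Dict.get?_eq_none_iff_not_mem_keys acc k).mp hg)
      | some cur => exact ⟨cur, rfl⟩
    have hcont : acc.contains k = true := (PySem.Dict.contains_iff_mem_keys acc k).mpr hkmem
    simp only [List.foldl_cons, hget]
    by_cases hc : cur = "" ∧ v ≠ ""
    · rw [if_pos hc]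
      have hkeys' : (acc.insert k v).keys = acc.keys := PySem.Dict.keys_insert_of_contains acc v hcont
      rw [ih (acc.insert k v) (hkeys' ▸ hacc) hndt
          (fun p hp => hkeys' ▸ hsub p (List.mem_cons_of_mem _ hp))]
      apply PySem.Dict.ext
      simp only [PySem.Dict.items_insert_of_contains acc v hcont, List.map_map]
      apply List.map_congr_left; intro p hp
      by_cases hpk : p.1 = k
      · have hp2 : p.2 = cur := by
          have := PySem.Dict.get?_of_mem_items acc (k := p.1) (v := p.2)
            (by simpa using hp) hacc
          rw [hpk, hget] at this; exact (Option.some.injEq _ _).mp this.symm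
        have hbeq : (p.1 == k) = true := by simp [hpk]
        simp only [Function.comp, hbeq, if_true]
        rw [hpk, hp2, if_pos hc.1]
        simp [hc.2, PySem.Dict.getD_eq_get?_getD, PySem.Dict.get?_mk_cons]
      · have hbeq : (p.1 == k) = false := by simp [hpk]
        have hbeq2 : (k == p.1) = false := by rw [beq_eq_false_iff_ne]; exact fun h => hpk h.symm
        simp only [Function.comp, hbeq, if_false, Bool.false_eq_true]
        by_cases hb : p.2 = "" <;>
          simp [hb, PySem.Dict.getD_eq_get?_getD, PySem.Dict.get?_mk_cons, hbeq2]
    · rw [if_neg hc]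
      rw [ih acc hacc hndt (fun p hp => hsub p (List.mem_cons_of_mem _ hp))]
      apply PySem.Dict.ext
      apply List.map_congr_left; intro p hp
      by_cases hpk : p.1 = k
      · have hp2 : p.2 = cur := by
          have := PySem.Dict.get?_of_mem_items acc (k := p.1) (v := p.2)
            (by simpa using hp) hacc
          rw [hpk, hget] at this; exact (Option.some.injEq _ _).mp this.symm
        have hbeq2 : (k == p.1) = true := by simp [hpk]
        by_cases hcur : cur = ""
        · have hv : v = "" := by
            by_contra hv; exact hc ⟨hcur, hv⟩
          have hnone : (PySem.Dict.mk t).get? p.1 = none := by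
            rw [PySem.Dict.get?_eq_none_iff_not_mem_keys]
            rw [hpk]; simpa [PySem.Dict.keys, PySem.Dict.items] using hknott
          rw [hp2, if_pos hcur, if_pos hcur]
          simp [PySem.Dict.getD_eq_get?_getD, PySem.Dict.get?_mk_cons, hbeq2, hnone, hv]
        · rw [hp2, if_neg hcur, if_neg hcur]
      · have hbeq2 : (k == p.1) = false := by rw [beq_eq_false_iff_ne]; exact fun h => hpk h.symm
        by_cases hb : p.2 = "" <;>
          simp [hb, PySem.Dict.getD_eq_get?_getD, PySem.Dict.get?_mk_cons, hbeq2]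

theorem pvMergeA_eq_pvMergeB (acc c : PySem.Dict String String)
    (hne : acc.items ≠ []) (hacc : acc.keys.Nodup) (hc : c.keys.Nodup)
    (hsub : ∀ x ∈ c.keys, x ∈ acc.keys) :
    pvMergeA acc c = pvMergeB acc c := by
  have hmk : PySem.Dict.mk c.items = c := rfl
  have hnd : (c.items.map Prod.fst).Nodup := by
    simpa [PySem.Dict.keys] using hc
  have hsb : ∀ p ∈ c.items, p.1 ∈ acc.keys := by
    intro p hp
    apply hsub p.1
    simp only [PySem.Dict.keys, List.mem_map]
    exact ⟨p, hp, rfl⟩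
  unfold pvMergeA pvMergeB
  rw [if_neg hne, pvMergeA_inner_spec c.items acc hacc hnd hsb, hmk]

-- the two group folds agree once the accumulator is nonempty and every newcomer's keys fit
theorem pvGroupFold_ne (rest : List (PySem.Dict String String)) :
    ∀ (acc : PySem.Dict String String), acc.items ≠ [] → acc.keys.Nodup →
    (∀ c ∈ rest, c.keys.Nodup ∧ ∀ x ∈ c.keys, x ∈ acc.keys) →
    rest.foldl pvStepA acc = rest.foldl pvMergeB acc := by
  induction rest with
  | nil => intro acc _ _ _; rfl
  | cons c t ih =>
    intro acc hne hacc hall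
    have hc := hall c List.mem_cons_self
    have hstep : pvStepA acc c = pvMergeB acc c := by
      rw [pvStepA, if_neg hne]
      exact pvMergeA_eq_pvMergeB acc c hne hacc hc.1 hc.2
    simp only [List.foldl_cons, hstep]
    have hkeys : (pvMergeB acc c).keys = acc.keys := pvMergeB_keys acc c hne
    have hne' : (pvMergeB acc c).items ≠ [] := by
      intro h
      apply hne
      have : (pvMergeB acc c).keys = [] := by simp [PySem.Dict.keys, h]
      rw [hkeys] at this
      simpa [PySem.Dict.keys] using this
    exact ih (pvMergeB acc c) hne' (hkeys ▸ hacc)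
      (fun d hd => ⟨(hall d (List.mem_cons_of_mem _ hd)).1,
        fun x hx => hkeys ▸ (hall d (List.mem_cons_of_mem _ hd)).2 x hx⟩)

-- A's outer fold, read at one key, is the group fold over that key's contacts
theorem pvFoldA_getD (cs : List (PySem.Dict String String)) :
    ∀ (md : PySem.Dict (String × String) (PySem.Dict String String)) (k : String × String),
    (cs.foldl (fun md c =>
        let key := pvKey c
        let cur := md.getD key PySem.Dict.empty
        if cur.items = [] then md.insert key c else md.insert key (pvMergeA cur c)) md).getD k PySem.Dict.empty
    = (cs.filter (fun c => decide (pvKey c = k))).foldl pvStepA (md.getD k PySem.Dict.empty) := by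
  induction cs with
  | nil => intro md k; rfl
  | cons c t ih =>
    intro md k
    simp only [List.foldl_cons, List.filter_cons]
    rw [ih]
    by_cases hck : pvKey c = k
    · simp only [hck, decide_true, if_true, List.foldl_cons]
      congr 1
      by_cases hcur : (md.getD k PySem.Dict.empty).items = []
      · simp [hcur, pvStepA]
      · simp [hcur, pvStepA]
    · have hd : (decide (pvKey c = k)) = false := by simp [hck]
      simp only [hd, Bool.false_eq_true, if_false]
      congr 1
      have hne : k ≠ pvKey c := fun h => hck h.symm
      by_cases hcur : (md.getD (pvKey c) PySem.Dict.empty).items = []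
      · simp only [hcur, if_true]
        rw [PySem.Dict.getD_insert, if_neg hne]
      · simp only [hcur, if_false]
        rw [PySem.Dict.getD_insert, if_neg hne]

-- A's outer step in insert-at-key form (for the keys lemmas)
theorem pvFoldA_step_eq :
    (fun (md : PySem.Dict (String × String) (PySem.Dict String String)) (c : PySem.Dict String String) =>
        let key := pvKey c
        let cur := md.getD key PySem.Dict.empty
        if cur.items = [] then md.insert key c else md.insert key (pvMergeA cur c))
    = fun md c => md.insert (pvKey c) (pvStepA (md.getD (pvKey c) PySem.Dict.empty) c) := by
  funext md c
  by_cases h : (md.getD (pvKey c) PySem.Dict.empty).items = [] <;>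
    simp [pvStepA, h]

-- B's grouping dict, read at one key
theorem pvGroups_getD (cs : List (PySem.Dict String String)) (k : String × String) :
    (cs.foldl (fun g c => g.modify (pvKey c) [] (fun grp => grp ++ [c])) PySem.Dict.empty).getD k []
    = cs.filter (fun c => decide (pvKey c = k)) := by
  have h1 : (cs.foldl (fun g c => g.modify (pvKey c) [] (fun grp => grp ++ [c])) PySem.Dict.empty)
      = ((cs.map (fun c => (pvKey c, c))).foldl
          (fun d p => d.modify p.1 [] (fun x => x ++ [p.2])) PySem.Dict.empty) := by
    rw [List.foldl_map]
  rw [h1, PySem.Dict.getD_foldl_modify_append, PySem.Dict.getD_empty, List.nil_append,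
    List.filter_map, List.map_map]
  have h2 : ((fun p : (String × String) × PySem.Dict String String => p.1 == k) ∘
      (fun c => (pvKey c, c))) = fun c => decide (pvKey c = k) := by
    funext c; simp [beq_eq_decide]
  rw [h2]
  simp only [Function.comp_def]
  simp

-- the per-key results agree under Pre_
theorem pvPerKey (contacts : List (List (String × String)))
    (hpre : Pre_merges_personal_datas contacts) (k : String × String)
    (hk : k ∈ (contacts.map PySem.Dict.ofList).map pvKey) :
    ((contacts.map PySem.Dict.ofList).filter (fun c => decide (pvKey c = k))).foldl pvStepA PySem.Dict.empty
    = ((contacts.map PySem.Dict.ofList).filter (fun c => decide (pvKey c = k))).foldl pvMergeB PySem.Dict.empty := by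
  have hskipA : ∀ (acc : PySem.Dict String String) (c : PySem.Dict String String),
      (!c.items.isEmpty) = false → pvStepA acc c = acc := by
    intro acc c h
    exact pvStepA_empty_c acc c (by simpa [List.isEmpty_iff] using h)
  have hskipB : ∀ (acc : PySem.Dict String String) (c : PySem.Dict String String),
      (!c.items.isEmpty) = false → pvMergeB acc c = acc := by
    intro acc c h
    exact pvMergeB_empty_c acc c (by simpa [List.isEmpty_iff] using h)
  rw [pvFoldl_skip _ _ hskipA, pvFoldl_skip _ _ hskipB]
  have hsub : ∀ d ∈ pvGroupNE contacts k, ∃ c0 ∈ contacts.map PySem.Dict.ofList, d = c0 := by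
    intro d hd
    have : d ∈ contacts.map PySem.Dict.ofList :=
      List.mem_of_mem_filter (List.mem_of_mem_filter hd)
    exact ⟨d, this, rfl⟩
  obtain ⟨c0, hc0, hkc0⟩ : ∃ c0 ∈ contacts.map PySem.Dict.ofList, pvKey c0 = k := by
    obtain ⟨c0, hc0, hkc0⟩ := List.mem_map.mp hk
    exact ⟨c0, hc0, hkc0⟩
  have hgne : ((contacts.map PySem.Dict.ofList).filter (fun c => decide (pvKey c = k))).filter
      (fun c => !c.items.isEmpty) = pvGroupNE contacts k := rfl
  rw [hgne]
  cases hcase : pvGroupNE contacts k with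
  | nil => rfl
  | cons f rest =>
    have hfmem : f ∈ pvGroupNE contacts k := by rw [hcase]; exact List.mem_cons_self
    have hfkeep := List.of_mem_filter hfmem
    have hfne : f.items ≠ [] := by simpa [List.isEmpty_iff] using hfkeep
    have hnodup : ∀ d ∈ pvGroupNE contacts k, d.keys.Nodup := by
      intro d hd
      have hdm : d ∈ contacts.map PySem.Dict.ofList :=
        List.mem_of_mem_filter (List.mem_of_mem_filter hd)
      obtain ⟨d0, _, hd0⟩ := List.mem_map.mp hdm
      rw [← hd0]
      exact PySem.Dict.nodup_keys_ofList d0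
    simp only [List.foldl_cons]
    have hA0 : pvStepA PySem.Dict.empty f = f := by simp [pvStepA, PySem.Dict.empty]
    have hB0 : pvMergeB PySem.Dict.empty f = f := by simp [pvMergeB, PySem.Dict.empty]
    rw [hA0, hB0]
    apply pvGroupFold_ne rest f hfne (hnodup f hfmem)
    intro d hd
    refine ⟨hnodup d (by rw [hcase]; exact List.mem_cons_of_mem _ hd), ?_⟩
    intro x hx
    have := hpre c0 hc0 d (by rw [hkc0, hcase]; exact hd) x hx
    rw [hkc0, hcase] at this
    simpa using this

-- ===== VERDICT (by name: the statement is the Claim_ definition above) =====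
theorem merges_personal_datas_spec : Claim_equal_merges_personal_datas := by
  intro contacts _ hpre
  unfold Spec_merges_personal_datas
  have hA : merges_personal_datas contacts
      = ((contacts.map PySem.Dict.ofList).foldl (fun md c =>
            let key := pvKey c
            let cur := md.getD key PySem.Dict.empty
            if cur.items = [] then md.insert key c else md.insert key (pvMergeA cur c))
          PySem.Dict.empty).values.map (fun d => d.items) := by
    unfold merges_personal_datas
    rw [List.foldl_map]
  have hB : merges_personal_datas_alt contacts
      = ((contacts.map PySem.Dict.ofList).foldl
            (fun g c => g.modify (pvKey c) [] (fun grp => grp ++ [c]))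
          PySem.Dict.empty).values.map (fun grp => (grp.foldl pvMergeB PySem.Dict.empty).items) := rfl
  rw [hA, hB]
  have hndE : (PySem.Dict.empty : PySem.Dict (String × String) (PySem.Dict String String)).keys.Nodup := by
    rw [PySem.Dict.keys_empty]; exact List.nodup_nil
  have hndE2 : (PySem.Dict.empty : PySem.Dict (String × String) (List (PySem.Dict String String))).keys.Nodup := by
    rw [PySem.Dict.keys_empty]; exact List.nodup_nil
  have hkA : ((contacts.map PySem.Dict.ofList).foldl (fun md c =>
        let key := pvKey c
        let cur := md.getD key PySem.Dict.empty
        if cur.items = [] then md.insert key c else md.insert key (pvMergeA cur c))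
      PySem.Dict.empty).keys = PySem.Set.ofList ((contacts.map PySem.Dict.ofList).map pvKey) := by
    rw [pvFoldA_step_eq, PySem.Dict.keys_foldl_insert_key, PySem.Dict.keys_empty]
    rfl
  have hndA : ((contacts.map PySem.Dict.ofList).foldl (fun md c =>
        let key := pvKey c
        let cur := md.getD key PySem.Dict.empty
        if cur.items = [] then md.insert key c else md.insert key (pvMergeA cur c))
      PySem.Dict.empty).keys.Nodup := by
    rw [pvFoldA_step_eq]
    exact PySem.Dict.nodup_keys_foldl_insert_key _ _ _ _ hndE
  have hkG : ((contacts.map PySem.Dict.ofList).foldl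
        (fun g c => g.modify (pvKey c) [] (fun grp => grp ++ [c]))
      PySem.Dict.empty).keys = PySem.Set.ofList ((contacts.map PySem.Dict.ofList).map pvKey) := by
    rw [PySem.Dict.keys_foldl_modify_key (f := fun _ c => fun grp => grp ++ [c]),
      PySem.Dict.keys_empty]
    rfl
  have hndG : ((contacts.map PySem.Dict.ofList).foldl
        (fun g c => g.modify (pvKey c) [] (fun grp => grp ++ [c]))
      PySem.Dict.empty).keys.Nodup := by
    exact PySem.Dict.nodup_keys_foldl_modify_key _ _ _ (fun _ c => fun grp => grp ++ [c]) _ hndE2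
  rw [PySem.Dict.values_eq_map_keys _ hndA PySem.Dict.empty,
      PySem.Dict.values_eq_map_keys _ hndG [],
      hkA, hkG, List.map_map, List.map_map, List.map_map]
  apply List.map_congr_left
  intro k hk
  simp only [Function.comp_def]
  have hk' : k ∈ (contacts.map PySem.Dict.ofList).map pvKey := by
    rw [List.map_map]
    exact (PySem.Set.mem_ofList _ _).mp hk
  rw [pvFoldA_getD, PySem.Dict.getD_empty, pvGroups_getD,
    pvPerKey contacts hpre k hk']
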